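-- pv_equiv track=rewrite | github.com/callarose4/document-qa-3 | Labs/Lab4.py | last_two_user_turns
-- ===== SOURCE A (Python) =====
-- def last_two_user_turns(messages):
--     system = [m for m in messages if m["role"] == "system"][:1]
--
--     user_idxs = [i for i, m in enumerate(messages) if m["role"] == "user"]
--     if len(user_idxs) <= 2:
--         return system + [m for m in messages if m["role"] != "system"]
--
--     start = user_idxs[-2]
--     tail = [m for m in messages[start:] if m["role"] != "system"]
--     return system + tail
-- ===== SOURCE B (Python) =====
-- def last_two_user_turns(messages):
--     # single reverse scan: find index of 2nd-most-recent user, but only use it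
--     # as the start if a 3rd-most-recent user also exists
--     start = 0
--     users = 0
--     second = 0
--     for i in range(len(messages) - 1, -1, -1):
--         if messages[i]["role"] == "user":
--             users += 1
--             if users == 2:
--                 second = i
--             elif users == 3:
--                 start = second
--                 break
--     # first system message only
--     system = []
--     for m in messages:
--         if m["role"] == "system":
--             system = [m]
--             break
--     return system + [m for m in messages[start:] if m["role"] != "system"]
-- ===== Notes on version B (the rewrite author's own statement) =====
-- stated objective: alternative
-- what changed: Replaces A's forward build-the-full-list-of-user-indices-then-negative-index-and-slice decomposition with a single early-stopping reverse scan that carries a user counter and the index of the 2nd-most-recent user (used as the start only once a 3rd user is seen), plus a break-on-first-match scan for the system message instead of filter-then-[:1].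
import Mathlib
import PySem

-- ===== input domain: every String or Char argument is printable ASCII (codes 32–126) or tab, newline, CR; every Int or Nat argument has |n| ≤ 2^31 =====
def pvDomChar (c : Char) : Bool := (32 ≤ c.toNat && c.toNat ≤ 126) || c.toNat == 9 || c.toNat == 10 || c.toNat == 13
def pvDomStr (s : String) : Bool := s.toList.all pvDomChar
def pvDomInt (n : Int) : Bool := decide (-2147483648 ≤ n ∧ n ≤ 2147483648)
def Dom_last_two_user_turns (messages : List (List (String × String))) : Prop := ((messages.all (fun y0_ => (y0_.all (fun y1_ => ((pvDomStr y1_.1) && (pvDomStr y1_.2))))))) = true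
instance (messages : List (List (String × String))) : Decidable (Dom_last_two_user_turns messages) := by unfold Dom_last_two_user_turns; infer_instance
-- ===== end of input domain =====

-- B replaces A's build-all-user-indices-then-slice decomposition by a single early-stopping
-- reverse scan that finds the start index directly (objective: alternative decomposition).

-- ===== PORT A =====
-- m["role"] (raises KeyError when absent — excluded by Pre_); getD "" is unreachable under Pre_
def pvRole (m : List (String × String)) : String := ((PySem.Dict.mk m).get? "role").getD ""

def last_two_user_turns (messages : List (List (String × String))) : List (List (String × String)) :=
  -- [m for m in messages if m["role"] == "system"][:1]  ([:1] = take 1)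
  let system := (messages.filter (fun m => pvRole m == "system")).take 1
  let user_idxs := (PySem.List.enumerate messages).filterMap
    (fun p => if pvRole p.2 == "user" then some p.1 else none)
  if user_idxs.length ≤ 2 then
    system ++ messages.filter (fun m => pvRole m != "system")
  else
    let start := PySem.List.pyGetD user_idxs (-2) 0
    let tail := (PySem.List.slice messages (some start) none).filter (fun m => pvRole m != "system")
    system ++ tail

-- ===== PORT B =====
-- the for-loop over range(len(messages)-1, -1, -1) with its break, carrying (users, second)
def pvScanStart (messages : List (List (String × String))) : List Int → Nat → Int → Int
  | [], _, _ => 0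
  | i :: rest, users, second =>
    if pvRole (PySem.List.pyGetD messages i []) == "user" then
      if users + 1 = 2 then pvScanStart messages rest (users + 1) i
      else if users + 1 = 3 then second
      else pvScanStart messages rest (users + 1) second
    else pvScanStart messages rest users second

-- the first-system loop with its break
def pvFirstSystem : List (List (String × String)) → List (List (String × String))
  | [] => []
  | m :: rest => if pvRole m == "system" then [m] else pvFirstSystem rest

def last_two_user_turns_alt (messages : List (List (String × String))) : List (List (String × String)) :=
  let start := pvScanStart messages (PySem.List.pyRange (PySem.List.len messages - 1) (-1) (-1)) 0 0
  let system := pvFirstSystem messages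
  system ++ (PySem.List.slice messages (some start) none).filter (fun m => pvRole m != "system")

-- ===== PRECONDITION & SPEC =====
-- Pre_ excludes exactly the inputs where a message has no "role" key: there Python A raises KeyError.
def Pre_last_two_user_turns (messages : List (List (String × String))) : Prop :=
  (messages.all (fun m => ((PySem.Dict.mk m).get? "role").isSome)) = true
instance (messages : List (List (String × String))) : Decidable (Pre_last_two_user_turns messages) := by
  unfold Pre_last_two_user_turns; infer_instance

def pvWitness_last_two_user_turns : (List (List (String × String))) :=
  [[("role", "system"), ("content", "s")], [("role", "user"), ("content", "a")],
   [("role", "assistant"), ("content", "b")], [("role", "user"), ("content", "c")],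
   [("role", "user"), ("content", "d")]]

def Spec_last_two_user_turns (messages : List (List (String × String))) (out : List (List (String × String))) : Prop := out = last_two_user_turns_alt messages
instance (messages : List (List (String × String))) (out : List (List (String × String))) : Decidable (Spec_last_two_user_turns messages out) := by unfold Spec_last_two_user_turns; infer_instance

-- ===== CLAIM (what is proved, stated in full; the proofs are below) =====
def Claim_equal_last_two_user_turns : Prop := ∀ (messages : List (List (String × String))), Dom_last_two_user_turns messages → Pre_last_two_user_turns messages → Spec_last_two_user_turns messages (last_two_user_turns messages)

-- ===== LEMMAS AND PROOFS =====

-- pvScanStart after discarding non-user indices (the loop only acts on user indices)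
def pvG : List Int → Nat → Int → Int
  | [], _, _ => 0
  | i :: rest, users, second =>
    if users + 1 = 2 then pvG rest (users + 1) i
    else if users + 1 = 3 then second
    else pvG rest (users + 1) second

lemma pvScanStart_eq_pvG (messages : List (List (String × String))) (is : List Int)
    (c : Nat) (s : Int) :
    pvScanStart messages is c s
      = pvG (is.filter (fun i => pvRole (PySem.List.pyGetD messages i []) == "user")) c s := by
  induction is generalizing c s with
  | nil => rfl
  | cons i rest ih =>
    by_cases h : (pvRole (PySem.List.pyGetD messages i []) == "user") = true
    · simp [pvScanStart, pvG, h]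
      split_ifs <;> simp [*]
    · simp only [Bool.not_eq_true] at h
      simp [pvScanStart, h, ih]

lemma pvG_short (v : List Int) (h : v.length ≤ 2) : pvG v 0 0 = 0 := by
  match v with
  | [] => rfl
  | [a] => rfl
  | [a, b] => rfl
  | a :: b :: c :: rest => simp at h

lemma pvG_long (a b c : Int) (rest : List Int) : pvG (a :: b :: c :: rest) 0 0 = b := rfl

lemma pvFirstSystem_eq (l : List (List (String × String))) :
    pvFirstSystem l = (l.filter (fun m => pvRole m == "system")).take 1 := by
  induction l with
  | nil => rfl
  | cons m rest ih =>
    by_cases h : (pvRole m == "system") = true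
    · simp [pvFirstSystem, h]
    · simp only [Bool.not_eq_true] at h
      simp [pvFirstSystem, h, ih]

lemma filterMap_guard (p : Int → Bool) (l : List Int) :
    l.filterMap (fun x => if p x then some x else none) = l.filter p := by
  induction l with
  | nil => rfl
  | cons x rest ih => by_cases h : p x <;> simp [h, ih]

-- A's user_idxs as a filter of the ascending cast index list
lemma userIdxs_eq (messages : List (List (String × String))) :
    (PySem.List.enumerate messages).filterMap
        (fun p => if pvRole p.2 == "user" then some p.1 else none)
      = ((List.range messages.length).map (fun (k : Nat) => (k : Int))).filter
          (fun i => pvRole (PySem.List.pyGetD messages i []) == "user") := by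
  rw [PySem.List.enumerate_eq_map_pyRange messages [], List.filterMap_map]
  have hlen : PySem.List.len messages = (messages.length : Int) := rfl
  rw [hlen, PySem.List.pyRange_zero_natCast]
  rw [← filterMap_guard (fun i => pvRole (PySem.List.pyGetD messages i []) == "user")]
  exact List.filterMap_congr (fun x _ => rfl)

-- B's scanned index list is the reverse of the ascending cast index list
lemma pyRange_down_eq_reverse (n : Nat) :
    PySem.List.pyRange ((n : Int) - 1) (-1) (-1)
      = ((List.range n).map (fun (k : Nat) => (k : Int))).reverse := by
  have h1 : PySem.List.pyRange ((n : Int) - 1) (-1) (-1)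
      = (List.range n).map (fun (k : Nat) => (n : Int) - 1 - (k : Int)) := by
    simp only [PySem.List.pyRange]
    norm_num
    have h : (if 0 < n then n else 0) = n := by split <;> omega
    rw [h]
    exact List.map_congr_left (fun k _ => by ring)
  rw [h1]
  apply List.ext_getElem
  · simp
  · intro k hk hk'
    simp only [List.length_map, List.length_range, List.length_reverse] at hk hk'
    rw [List.getElem_reverse]
    simp
    omega

-- ===== VERDICT (by name: the statement is the Claim_ definition above) =====
theorem last_two_user_turns_spec : Claim_equal_last_two_user_turns := by
  intro messages _ _
  unfold Spec_last_two_user_turns last_two_user_turns last_two_user_turns_alt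
  have hlen : PySem.List.len messages = (messages.length : Int) := rfl
  rw [userIdxs_eq, hlen, pyRange_down_eq_reverse, pvScanStart_eq_pvG, List.filter_reverse,
      pvFirstSystem_eq]
  set u := fun i => pvRole (PySem.List.pyGetD messages i []) == "user" with hu
  set idxs := ((List.range messages.length).map (fun (k : Nat) => (k : Int))).filter u with hidxs
  by_cases hle : idxs.length ≤ 2
  · rw [if_pos hle, pvG_short _ (by simpa using hle)]
    simp [PySem.List.slice_zero_start, PySem.List.slice_none_none]
  · rw [if_neg hle]
    have hlt : 2 < idxs.length := Nat.lt_of_not_le hle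
    obtain ⟨a, b, c, rest, hrev⟩ :
        ∃ a b c rest, idxs.reverse = a :: b :: c :: rest := by
      have h3 : 3 ≤ idxs.reverse.length := by simpa using hlt
      match hv : idxs.reverse with
      | [] => rw [hv] at h3; simp at h3
      | [x] => rw [hv] at h3; simp at h3
      | [x, y] => rw [hv] at h3; simp at h3
      | x :: y :: z :: r => exact ⟨x, y, z, r, rfl⟩
    rw [hrev, pvG_long]
    have hstart : PySem.List.pyGetD idxs (-2) 0 = b := by
      rw [PySem.List.pyGetD_neg_ofNat idxs 2 0 (by omega) (by omega)]
      have h1 : idxs.reverse[1]? = some b := by rw [hrev]; rfl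
      rw [List.getElem?_reverse (by omega)] at h1
      have h2 : idxs.length - 1 - 1 = idxs.length - 2 := by omega
      rw [h2, List.getElem?_eq_getElem (by omega)] at h1
      exact Option.some.inj h1
    rw [hstart]
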